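-- pv_equiv track=rewrite | github.com/jkhkjlkll/d3-demo-vue2 | skills/deploy-architecture-skill/scripts/build_architecture.py | build_type_config
-- ===== SOURCE A (Python) =====
-- from typing import Dict, Iterable, List, Tuple
--
-- FALLBACK_COLORS = [
--     "#4db8ff",
--     "#00d68f",
--     "#9d6fff",
--     "#ff8c33",
--     "#00e5ff",
--     "#ffcc00",
--     "#7fa8cc",
--     "#ff6666",
-- ]
--
-- def pick_color(index: int, fallback_map: Dict[str, str], label: str) -> str:
--     return fallback_map.get(label, FALLBACK_COLORS[index % len(FALLBACK_COLORS)])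
--
-- def order_labels(labels: Iterable[str], known_order: List[str]) -> List[str]:
--     known_index = {name: i for i, name in enumerate(known_order)}
--     return sorted(set(labels), key=lambda x: (known_index.get(x, 999), x))
--
-- def build_type_config(labels: List[str], known_order: List[str], color_map: Dict[str, str]) -> List[Dict]:
--     ordered = order_labels(labels, known_order)
--     return [
--         {
--             "type": label,
--             "color": pick_color(idx, color_map, label),
--         }
--         for idx, label in enumerate(ordered)
--     ]
-- ===== SOURCE B (Python) =====
-- FALLBACK_COLORS = [
--     "#4db8ff",
--     "#00d68f",
--     "#9d6fff",
--     "#ff8c33",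
--     "#00e5ff",
--     "#ffcc00",
--     "#7fa8cc",
--     "#ff6666",
-- ]
--
-- def build_type_config(labels, known_order, color_map):
--     last = {}
--     for i, name in enumerate(known_order):
--         last[name] = i
--     groups = {}
--     for name in set(labels):
--         groups.setdefault(last.get(name, 999), []).append(name)
--     ordered = []
--     for key in sorted(groups):
--         ordered.extend(sorted(groups[key]))
--     return [
--         {"type": name, "color": color_map.get(name, FALLBACK_COLORS[i % len(FALLBACK_COLORS)])}
--         for i, name in enumerate(ordered)
--     ]
-- ===== Notes on version B (the rewrite author's own statement) =====
-- stated objective: alternative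
-- what changed: Replaces A's single sort of the label set under the tuple key (known_index.get(x, 999), x) by bucket grouping: labels are bucketed by that integer key into a dict of lists, the bucket keys are sorted, and each bucket is emitted in alphabetical order; colors are attached by enumerating the concatenation.
import Mathlib
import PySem

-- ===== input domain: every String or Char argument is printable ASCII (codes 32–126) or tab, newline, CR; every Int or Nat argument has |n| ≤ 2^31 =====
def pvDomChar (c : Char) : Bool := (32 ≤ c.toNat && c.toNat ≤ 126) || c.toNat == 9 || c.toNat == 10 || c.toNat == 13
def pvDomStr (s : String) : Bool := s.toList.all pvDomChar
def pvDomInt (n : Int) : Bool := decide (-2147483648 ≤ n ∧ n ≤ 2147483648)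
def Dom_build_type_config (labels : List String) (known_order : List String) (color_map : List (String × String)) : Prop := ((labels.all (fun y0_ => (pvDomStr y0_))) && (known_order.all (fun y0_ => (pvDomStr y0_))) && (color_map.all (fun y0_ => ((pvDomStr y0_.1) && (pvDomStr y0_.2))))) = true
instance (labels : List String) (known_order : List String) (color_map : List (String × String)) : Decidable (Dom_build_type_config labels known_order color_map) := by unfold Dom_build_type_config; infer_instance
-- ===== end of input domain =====

-- B replaces A's single (known_index, name)-keyed sort of the label set by bucket grouping:
-- labels are grouped by their known_order key, the group keys are sorted, and each group is
-- emitted in alphabetical order (objective: alternative decomposition, same result).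


-- ===== PORT A =====
def FALLBACK_COLORS : List String :=
  ["#4db8ff", "#00d68f", "#9d6fff", "#ff8c33", "#00e5ff", "#ffcc00", "#7fa8cc", "#ff6666"]

def pick_color (index : Int) (fallback_map : PySem.Dict String String) (label : String) : String :=
  fallback_map.getD label
    (PySem.List.pyGetD FALLBACK_COLORS (PySem.Int.mod index (FALLBACK_COLORS.length : Int)) "")
    -- index % 8 is always in range, so pyGetD is exact here

def order_labels (labels : List String) (known_order : List String) : List String :=
  let known_index : PySem.Dict String Int :=
    (PySem.List.enumerate known_order 0).foldl (fun d p => d.insert p.2 p.1) PySem.Dict.empty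
  PySem.List.sorted2 (PySem.Set.ofList labels) (fun x => known_index.getD x 999) (fun x => x)
  -- key (known_index.get(x, 999), x) is injective in x, so sorting the set is order-exact

def build_type_config (labels : List String) (known_order : List String) (color_map : List (String × String)) : List (List (String × String)) :=
  let ordered := order_labels labels known_order
  (PySem.List.enumerate ordered 0).map
    (fun p => [("type", p.2), ("color", pick_color p.1 (PySem.Dict.ofList color_map) p.2)])

-- ===== PORT B =====
def build_type_config_alt (labels : List String) (known_order : List String) (color_map : List (String × String)) : List (List (String × String)) :=
  let last : PySem.Dict String Int :=
    (PySem.List.enumerate known_order 0).foldl (fun d p => d.insert p.2 p.1) PySem.Dict.empty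
  -- groups.setdefault(k, []).append(name) is Dict.modify with default []; iterating set(labels)
  -- is exact because each group is re-sorted below, so the result is iteration-order independent
  let groups : PySem.Dict Int (List String) :=
    (PySem.Set.ofList labels).foldl
      (fun g name => g.modify (last.getD name 999) [] (fun v => v ++ [name])) PySem.Dict.empty
  -- groups[key] with key drawn from groups' own keys never raises, so getD [] is exact
  let ordered := (PySem.List.sorted groups.keys (fun k => k)).foldl
      (fun acc k => acc ++ PySem.List.sorted (groups.getD k []) (fun x => x)) []
  (PySem.List.enumerate ordered 0).map
    (fun p => [("type", p.2),
               ("color", (PySem.Dict.ofList color_map).getD p.2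
                  (PySem.List.pyGetD FALLBACK_COLORS (PySem.Int.mod p.1 (FALLBACK_COLORS.length : Int)) ""))])

-- ===== PRECONDITION & SPEC =====
def Spec_build_type_config (labels : List String) (known_order : List String) (color_map : List (String × String)) (out : List (List (String × String))) : Prop := out = build_type_config_alt labels known_order color_map
instance (labels : List String) (known_order : List String) (color_map : List (String × String)) (out : List (List (String × String))) : Decidable (Spec_build_type_config labels known_order color_map out) := by unfold Spec_build_type_config; infer_instance

-- ===== CLAIM (what is proved, stated in full; the proofs are below) =====
def Claim_equal_build_type_config : Prop := ∀ (labels : List String) (known_order : List String) (color_map : List (String × String)), Dom_build_type_config labels known_order color_map → Spec_build_type_config labels known_order color_map (build_type_config labels known_order color_map)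

-- ===== LEMMAS AND PROOFS =====

theorem sorted2_eq_sorted_lex (xs : List String) (k1 : String → Int) :
    PySem.List.sorted2 xs k1 (fun x => x) =
      PySem.List.sorted xs (fun x => toLex (k1 x, x)) := by
  have hb : (fun a b : String => decide (k1 a < k1 b) || !decide (k1 b < k1 a) && decide (a < b))
      = (fun a b : String => decide (toLex (k1 a, a) < toLex (k1 b, b))) := by
    funext a b
    rw [Bool.eq_iff_iff]
    simp only [Bool.or_eq_true, Bool.and_eq_true, Bool.not_eq_true', decide_eq_true_eq,
      decide_eq_false_iff_not, Prod.Lex.lt_iff, ofLex_toLex]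
    constructor
    · rintro (h | ⟨h1, h2⟩)
      · exact Or.inl h
      · rcases lt_trichotomy (k1 a) (k1 b) with h3 | h3 | h3
        · exact Or.inl h3
        · exact Or.inr ⟨h3, h2⟩
        · exact absurd h3 h1
    · rintro (h | ⟨h1, h2⟩)
      · exact Or.inl h
      · exact Or.inr ⟨by simp [h1], h2⟩
  unfold PySem.List.sorted2 PySem.List.sorted
  simp only [Bool.false_eq_true, if_false, hb]

theorem block_pairwise (S : List String) (g : String → Int) (hS : S.Nodup) (k : Int) :
    (PySem.List.sorted (S.filter (fun n => g n == k)) (fun x => x)).Pairwise (· < ·) := by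
  have hle := PySem.List.sorted_pairwise (S.filter (fun n => g n == k)) (fun x => x)
  have hnd : (PySem.List.sorted (S.filter (fun n => g n == k)) (fun x => x)).Nodup :=
    (PySem.List.sorted_perm _ _ _).symm.nodup (hS.filter _)
  exact (hle.and hnd).imp (fun h => lt_of_le_of_ne h.1 h.2)

theorem block_mem (S : List String) (g : String → Int) (k : Int) (x : String) :
    x ∈ PySem.List.sorted (S.filter (fun n => g n == k)) (fun x => x) ↔ x ∈ S ∧ g x = k := by
  rw [PySem.List.mem_sorted, List.mem_filter]
  simp

theorem pairwise_flatMap_blocks (S : List String) (g : String → Int) (hS : S.Nodup)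
    (ks : List Int) (hks : ks.Pairwise (· < ·)) :
    (ks.flatMap (fun k => PySem.List.sorted (S.filter (fun n => g n == k)) (fun x => x))).Pairwise
      (fun a b => (toLex (g a, a) : Lex (Int × String)) < toLex (g b, b)) := by
  induction ks with
  | nil => simp
  | cons k t ih =>
    rw [List.flatMap_cons, List.pairwise_append]
    refine ⟨?_, ih (List.pairwise_cons.mp hks).2, ?_⟩
    · refine (block_pairwise S g hS k).imp_of_mem ?_
      intro a b ha hb hab
      have hga := ((block_mem S g k a).mp ha).2
      have hgb := ((block_mem S g k b).mp hb).2
      simp only [Prod.Lex.lt_iff, ofLex_toLex]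
      exact Or.inr ⟨by rw [hga, hgb], hab⟩
    · intro a ha b hb
      obtain ⟨k', hk', hb'⟩ := List.mem_flatMap.mp hb
      have hga := ((block_mem S g k a).mp ha).2
      have hgb := ((block_mem S g k' b).mp hb').2
      simp only [Prod.Lex.lt_iff, ofLex_toLex]
      left
      rw [hga, hgb]
      exact (List.pairwise_cons.mp hks).1 k' hk'

theorem grouped_eq (S : List String) (g : String → Int) (hS : S.Nodup) :
    PySem.List.sorted S (fun x => toLex (g x, x)) =
      (PySem.List.sorted (PySem.Set.ofList (S.map g)) (fun k => k)).flatMap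
        (fun k => PySem.List.sorted (S.filter (fun n => g n == k)) (fun x => x)) := by
  set KS := PySem.List.sorted (PySem.Set.ofList (S.map g)) (fun k => k) with hKS
  have hksp : KS.Pairwise (· < ·) := PySem.List.sorted_ofList_pairwise_lt (S.map g)
  have hpw := pairwise_flatMap_blocks S g hS KS hksp
  have hnodup : (KS.flatMap (fun k => PySem.List.sorted (S.filter (fun n => g n == k)) (fun x => x))).Nodup :=
    hpw.imp (fun h hab => by rw [hab] at h; exact lt_irrefl _ h)
  have hperm : (KS.flatMap (fun k => PySem.List.sorted (S.filter (fun n => g n == k)) (fun x => x))).Perm S := by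
    refine (List.perm_ext_iff_of_nodup hnodup hS).mpr ?_
    intro x
    rw [List.mem_flatMap]
    constructor
    · rintro ⟨k, _, hx⟩
      exact ((block_mem S g k x).mp hx).1
    · intro hx
      refine ⟨g x, ?_, (block_mem S g (g x) x).mpr ⟨hx, rfl⟩⟩
      rw [hKS, PySem.List.mem_sorted, PySem.Set.mem_ofList]
      exact List.mem_map.mpr ⟨x, hx, rfl⟩
  exact PySem.List.sorted_eq_of_perm_of_pairwise_lt S _ _ hperm hpw

theorem ordered_eq (labels ko : List String) :
    order_labels labels ko =
      ((PySem.List.sorted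
          ((PySem.Set.ofList labels).foldl
            (fun g name =>
              g.modify (((PySem.List.enumerate ko 0).foldl (fun d p => d.insert p.2 p.1) PySem.Dict.empty).getD name 999)
                [] (fun v => v ++ [name])) PySem.Dict.empty).keys (fun k => k)).foldl
        (fun acc k => acc ++ PySem.List.sorted
          (((PySem.Set.ofList labels).foldl
            (fun g name =>
              g.modify (((PySem.List.enumerate ko 0).foldl (fun d p => d.insert p.2 p.1) PySem.Dict.empty).getD name 999)
                [] (fun v => v ++ [name])) PySem.Dict.empty).getD k []) (fun x => x)) []) := by
  set kidx := (PySem.List.enumerate ko 0).foldl (fun d p => d.insert p.2 p.1) PySem.Dict.empty with hkidx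
  set g : String → Int := fun x => kidx.getD x 999 with hg
  set S := PySem.Set.ofList labels with hSdef
  have hS : S.Nodup := PySem.Set.nodup_ofList labels
  set groups := S.foldl (fun d name => d.modify (g name) [] (fun v => v ++ [name])) PySem.Dict.empty with hgroups
  -- keys
  have hkeys : groups.keys = PySem.Set.ofList (S.map g) := by
    rw [hgroups, PySem.Dict.keys_foldl_modify_key S g [] (fun d x v => v ++ [x]) PySem.Dict.empty]
    simp [PySem.Dict.keys_empty, PySem.Set.update, PySem.Set.ofList, PySem.Set.empty]
  -- group contents
  have hgetD : ∀ k, groups.getD k [] = S.filter (fun n => g n == k) := by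
    intro k
    have hfold : groups = (S.map (fun n => (g n, n))).foldl
        (fun d p => d.modify p.1 [] (fun x => x ++ [p.2])) PySem.Dict.empty := by
      rw [List.foldl_map]
    rw [hfold, PySem.Dict.getD_foldl_modify_append]
    rw [List.filter_map]
    simp only [Function.comp_def, List.map_map]
    simp [PySem.Dict.getD_empty]
  -- assemble
  rw [PySem.List.foldl_append_eq_flatMap]
  rw [List.nil_append]
  have hcong : ∀ ks : List Int,
      ks.flatMap (fun k => PySem.List.sorted (groups.getD k []) (fun x => x))
        = ks.flatMap (fun k => PySem.List.sorted (S.filter (fun n => g n == k)) (fun x => x)) := by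
    intro ks
    apply List.flatMap_congr
    intro k _
    rw [hgetD k]
  rw [hkeys, hcong]
  rw [← grouped_eq S g hS]
  have horder : order_labels labels ko = PySem.List.sorted2 S g (fun x => x) := rfl
  rw [horder, sorted2_eq_sorted_lex S g]

-- ===== VERDICT (by name: the statement is the Claim_ definition above) =====
theorem build_type_config_spec : Claim_equal_build_type_config := by
  intro labels ko cm _hDom
  unfold Spec_build_type_config build_type_config build_type_config_alt pick_color
  rw [ordered_eq labels ko]
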